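-- pv_equiv track=rewrite | github.com/WSm-77/algorithms_and_data_structures | exams/2023-24/term2/A/egz2a_memoization.py | wired
-- ===== SOURCE A (Python) =====
-- def cost(T, beg, end):
--     return abs(T[beg] - T[end]) + 1
--
-- def wired( T ):
--     # tu prosze wpisac wlasna implementacje
--     n = len(T) // 2
--
--     dp = {}
--
--     def backtrack(socketIdx, wiresCnt):
--         key = (socketIdx, wiresCnt)
--         if key not in dp:
--             if wiresCnt == 1:
--                 dp[key] = cost(T, socketIdx, socketIdx + 1)
--             else:
--                 minVal = backtrack(socketIdx + 1, wiresCnt - 1) + cost(T, socketIdx, socketIdx + 2 * wiresCnt - 1)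
--
--                 for wires in range(1, wiresCnt):
--                     minVal = min(minVal, backtrack(socketIdx, wires) + backtrack(socketIdx + 2*wires, wiresCnt - wires))
--
--                 dp[key] = minVal
--
--         return dp[key]
--
--     return backtrack(0, n)
-- ===== SOURCE B (Python) =====
-- def wired(T):
--     n = len(T) // 2
--     dp = {}
--     for w in range(1, n + 1):
--         for i in range(2 * n - 2 * w + 1):
--             if w == 1:
--                 best = abs(T[i] - T[i + 1]) + 1
--             else:
--                 best = dp[(i + 1, w - 1)] + abs(T[i] - T[i + 2 * w - 1]) + 1
--                 for k in range(1, w):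
--                     cur = dp[(i, k)] + dp[(i + 2 * k, w - k)]
--                     if cur < best:
--                         best = cur
--             dp[(i, w)] = best
--     return dp[(0, n)]
-- ===== Notes on version B (the rewrite author's own statement) =====
-- stated objective: alternative
-- what changed: Replaces the top-down memoized recursion (nested backtrack closure with a dict cache) by an iterative bottom-up tabulation that fills dp[(socketIdx, wiresCnt)] for wiresCnt = 1..n with plain nested loops and no recursion.
import Mathlib
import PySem

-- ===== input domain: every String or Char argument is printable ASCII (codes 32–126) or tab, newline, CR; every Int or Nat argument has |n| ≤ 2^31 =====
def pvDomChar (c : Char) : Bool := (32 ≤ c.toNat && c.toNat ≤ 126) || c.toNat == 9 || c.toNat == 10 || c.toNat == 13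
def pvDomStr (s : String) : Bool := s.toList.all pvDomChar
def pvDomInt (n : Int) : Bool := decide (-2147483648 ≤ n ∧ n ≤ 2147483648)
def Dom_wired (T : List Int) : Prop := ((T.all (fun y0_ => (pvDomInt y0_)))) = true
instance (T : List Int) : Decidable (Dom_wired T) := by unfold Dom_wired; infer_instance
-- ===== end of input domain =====

-- B replaces A's memoized top-down recursion by an iterative bottom-up tabulation (alternative decomposition, same cost).


-- ===== PORT A =====
-- cost(T, beg, end); indexing via pyGetD with default 0 is exact here: under Pre_ every index
-- the algorithm touches is in range, so Python's T[beg] never raises.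
def costP (T : List Int) (beg e : Int) : Int :=
  |PySem.List.pyGetD T beg 0 - PySem.List.pyGetD T e 0| + 1

mutual
-- backtrack(socketIdx, wiresCnt) threading the memo dict dp
def btA (T : List Int) (i : Int) (w : Nat) (dp : PySem.Dict (Int × Int) Int) :
    Int × PySem.Dict (Int × Int) Int :=
  match dp.get? (i, (w : Int)) with
  | some v => (v, dp)
  | none =>
    if w = 1 then
      let v := costP T i (i + 1)
      (v, dp.insert (i, (w : Int)) v)
    else if w = 0 then (0, dp)  -- totality guard: Python recurses forever here (unreachable under Pre_)
    else
      let r := btA T (i + 1) (w - 1) dp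
      let base := r.1 + costP T i (i + 2 * (w : Int) - 1)
      let l := loopA T i w 1 base r.2
      (l.1, l.2.insert (i, (w : Int)) l.1)
  termination_by (w, w + 1)

-- the 'for wires in range(1, wiresCnt)' loop; the 1 ≤ k conjunct is a totality guard
-- (the loop is always entered at k = 1, exactly as Python's range(1, wiresCnt))
def loopA (T : List Int) (i : Int) (w k : Nat) (mv : Int) (dp : PySem.Dict (Int × Int) Int) :
    Int × PySem.Dict (Int × Int) Int :=
  if h : 1 ≤ k ∧ k < w then
    let r1 := btA T i k dp
    let r2 := btA T (i + 2 * (k : Int)) (w - k) r1.2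
    loopA T i w (k + 1) (min mv (r1.1 + r2.1)) r2.2
  else (mv, dp)
  termination_by (w, w - k)
end

def wired (T : List Int) : Int :=
  (btA T 0 (T.length / 2) PySem.Dict.empty).1

-- ===== PORT B =====
def wired_alt (T : List Int) : Int :=
  let n := T.length / 2
  let dp := (List.range' 1 n).foldl (fun dp (w : Nat) =>
    (List.range (2 * n - 2 * w + 1)).foldl (fun dp (i : Nat) =>
      let best :=
        if w = 1 then
          |PySem.List.pyGetD T (i : Int) 0 - PySem.List.pyGetD T ((i : Int) + 1) 0| + 1
        else
          let base := dp.getD ((i : Int) + 1, (w : Int) - 1) 0 +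
            |PySem.List.pyGetD T (i : Int) 0 - PySem.List.pyGetD T ((i : Int) + 2 * (w : Int) - 1) 0| + 1
          (List.range' 1 (w - 1)).foldl (fun best k =>
            let cur := dp.getD ((i : Int), (k : Int)) 0 +
              dp.getD ((i : Int) + 2 * (k : Int), (w : Int) - (k : Int)) 0
            if cur < best then cur else best) base
      dp.insert ((i : Int), (w : Int)) best) dp) PySem.Dict.empty
  dp.getD (0, (n : Int)) 0

-- ===== PRECONDITION & SPEC =====
-- Pre_ excludes exactly the inputs with fewer than two elements, on which Python A never
-- returns (RecursionError from unbounded recursion into wiresCnt ≤ 0).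
def Pre_wired (T : List Int) : Prop := 2 ≤ T.length
instance (T : List Int) : Decidable (Pre_wired T) := by unfold Pre_wired; infer_instance
def pvWitness_wired : List Int := [0, 1]

def Spec_wired (T : List Int) (out : Int) : Prop := out = wired_alt T
instance (T : List Int) (out : Int) : Decidable (Spec_wired T out) := by unfold Spec_wired; infer_instance

-- ===== CLAIM (what is proved, stated in full; the proofs are below) =====
def Claim_equal_wired : Prop := ∀ (T : List Int), Dom_wired T → Pre_wired T → Spec_wired T (wired T)

-- ===== LEMMAS AND PROOFS =====

-- pure value of A's backtrack(i, w) / of B's table cell (i, w)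
mutual
def OPT (T : List Int) (i : Int) (w : Nat) : Int :=
  if w = 1 then costP T i (i + 1)
  else if w = 0 then 0
  else OPTl T i w 1 (OPT T (i + 1) (w - 1) + costP T i (i + 2 * (w : Int) - 1))
  termination_by (w, w + 1)

def OPTl (T : List Int) (i : Int) (w k : Nat) (mv : Int) : Int :=
  if h : 1 ≤ k ∧ k < w then
    OPTl T i w (k + 1) (min mv (OPT T i k + OPT T (i + 2 * (k : Int)) (w - k)))
  else mv
  termination_by (w, w - k)
end

-- every memo entry is the pure value
def GoodA (T : List Int) (dp : PySem.Dict (Int × Int) Int) : Prop :=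
  ∀ (i : Int) (w : Nat) (v : Int), dp.get? (i, (w : Int)) = some v → v = OPT T i w

-- unfolding equations for the mutual definitions (the let-bindings written out)
theorem loopA_pos {T : List Int} {i : Int} {w k : Nat} {mv : Int}
    {dp : PySem.Dict (Int × Int) Int} (h : 1 ≤ k ∧ k < w) :
    loopA T i w k mv dp =
      loopA T i w (k + 1)
        (min mv ((btA T i k dp).1 + (btA T (i + 2 * (k : Int)) (w - k) (btA T i k dp).2).1))
        (btA T (i + 2 * (k : Int)) (w - k) (btA T i k dp).2).2 := by
  rw [loopA, dif_pos h]

theorem loopA_neg {T : List Int} {i : Int} {w k : Nat} {mv : Int}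
    {dp : PySem.Dict (Int × Int) Int} (h : ¬ (1 ≤ k ∧ k < w)) :
    loopA T i w k mv dp = (mv, dp) := by
  rw [loopA, dif_neg h]

theorem OPTl_pos {T : List Int} {i : Int} {w k : Nat} {mv : Int} (h : 1 ≤ k ∧ k < w) :
    OPTl T i w k mv =
      OPTl T i w (k + 1) (min mv (OPT T i k + OPT T (i + 2 * (k : Int)) (w - k))) := by
  rw [OPTl, dif_pos h]

theorem OPTl_neg {T : List Int} {i : Int} {w k : Nat} {mv : Int} (h : ¬ (1 ≤ k ∧ k < w)) :
    OPTl T i w k mv = mv := by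
  rw [OPTl, dif_neg h]

theorem btA_some {T : List Int} {i : Int} {w : Nat} {dp : PySem.Dict (Int × Int) Int} {v : Int}
    (heq : dp.get? (i, (w : Int)) = some v) : btA T i w dp = (v, dp) := by
  rw [btA, heq]

theorem btA_one {T : List Int} {i : Int} {w : Nat} {dp : PySem.Dict (Int × Int) Int}
    (heq : dp.get? (i, (w : Int)) = none) (h1 : w = 1) :
    btA T i w dp = (costP T i (i + 1), dp.insert (i, (w : Int)) (costP T i (i + 1))) := by
  rw [btA, heq, if_pos h1]

theorem btA_zero {T : List Int} {i : Int} {w : Nat} {dp : PySem.Dict (Int × Int) Int}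
    (heq : dp.get? (i, (w : Int)) = none) (h1 : w ≠ 1) (h0 : w = 0) :
    btA T i w dp = (0, dp) := by
  rw [btA, heq, if_neg h1, if_pos h0]

theorem btA_else {T : List Int} {i : Int} {w : Nat} {dp : PySem.Dict (Int × Int) Int}
    (heq : dp.get? (i, (w : Int)) = none) (h1 : w ≠ 1) (h0 : w ≠ 0) :
    btA T i w dp =
      ((loopA T i w 1 ((btA T (i + 1) (w - 1) dp).1 + costP T i (i + 2 * (w : Int) - 1))
          (btA T (i + 1) (w - 1) dp).2).1,
        ((loopA T i w 1 ((btA T (i + 1) (w - 1) dp).1 + costP T i (i + 2 * (w : Int) - 1))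
          (btA T (i + 1) (w - 1) dp).2).2).insert (i, (w : Int))
          (loopA T i w 1 ((btA T (i + 1) (w - 1) dp).1 + costP T i (i + 2 * (w : Int) - 1))
            (btA T (i + 1) (w - 1) dp).2).1) := by
  rw [btA, heq, if_neg h1, if_neg h0]

theorem OPT_one {T : List Int} {i : Int} {w : Nat} (h1 : w = 1) :
    OPT T i w = costP T i (i + 1) := by
  rw [OPT, if_pos h1]

theorem OPT_zero {T : List Int} {i : Int} : OPT T i 0 = 0 := by
  rw [OPT]; simp

theorem OPT_else {T : List Int} {i : Int} {w : Nat} (h1 : w ≠ 1) (h0 : w ≠ 0) :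
    OPT T i w = OPTl T i w 1 (OPT T (i + 1) (w - 1) + costP T i (i + 2 * (w : Int) - 1)) := by
  rw [OPT, if_neg h1, if_neg h0]

theorem goodA_insert {T : List Int} {dp : PySem.Dict (Int × Int) Int} (h : GoodA T dp)
    (i : Int) (w : Nat) : GoodA T (dp.insert (i, (w : Int)) (OPT T i w)) := by
  intro i' w' v hv
  rw [PySem.Dict.get?_insert] at hv
  split at hv
  · rename_i hkey
    have h1 : i' = i := congrArg Prod.fst hkey
    have h2 : ((w' : Int)) = (w : Int) := congrArg Prod.snd hkey
    have h3 : w' = w := by exact_mod_cast h2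
    subst h1 h3
    exact (Option.some_inj.mp hv).symm
  · exact h i' w' v hv

theorem btA_loopA_correct (T : List Int) : ∀ (w : Nat),
    (∀ (i : Int) (dp : PySem.Dict (Int × Int) Int), GoodA T dp →
      (btA T i w dp).1 = OPT T i w ∧ GoodA T (btA T i w dp).2) ∧
    (∀ (k : Nat) (i mv : Int) (dp : PySem.Dict (Int × Int) Int), GoodA T dp →
      (loopA T i w k mv dp).1 = OPTl T i w k mv ∧ GoodA T (loopA T i w k mv dp).2) := by
  intro w
  induction w using Nat.strong_induction_on with
  | _ w IH =>
    have hloop : ∀ (j k : Nat), w - k ≤ j → ∀ (i mv : Int) (dp : PySem.Dict (Int × Int) Int),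
        GoodA T dp → (loopA T i w k mv dp).1 = OPTl T i w k mv ∧
          GoodA T (loopA T i w k mv dp).2 := by
      intro j
      induction j with
      | zero =>
        intro k hk i mv dp hdp
        have hno : ¬ (1 ≤ k ∧ k < w) := by omega
        rw [loopA_neg hno, OPTl_neg hno]
        exact ⟨rfl, hdp⟩
      | succ j IHj =>
        intro k hk i mv dp hdp
        by_cases h : 1 ≤ k ∧ k < w
        · rw [loopA_pos h, OPTl_pos h]
          obtain ⟨h1a, h1b⟩ := (IH k h.2).1 i dp hdp
          obtain ⟨h2a, h2b⟩ := (IH (w - k) (by omega)).1 (i + 2 * (k : Int)) _ h1b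
          rw [h1a, h2a]
          exact IHj (k + 1) (by omega) i _ _ h2b
        · rw [loopA_neg h, OPTl_neg h]
          exact ⟨rfl, hdp⟩
    refine ⟨?_, fun k => hloop (w - k) k le_rfl⟩
    intro i dp hdp
    cases hget : dp.get? (i, (w : Int)) with
    | some v =>
      rw [btA_some hget]
      exact ⟨hdp i w v hget, hdp⟩
    | none =>
      by_cases h1 : w = 1
      · rw [btA_one hget h1]
        refine ⟨(OPT_one h1).symm, ?_⟩
        have hgood := goodA_insert hdp i w
        rw [OPT_one h1] at hgood
        exact hgood
      · by_cases h0 : w = 0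
        · rw [btA_zero hget h1 h0]
          subst h0
          exact ⟨OPT_zero.symm, hdp⟩
        · rw [btA_else hget h1 h0]
          obtain ⟨ra, rb⟩ := (IH (w - 1) (by omega)).1 (i + 1) dp hdp
          obtain ⟨la, lb⟩ := hloop (w - 1) 1 (by omega) i
            ((btA T (i + 1) (w - 1) dp).1 + costP T i (i + 2 * (w : Int) - 1)) _ rb
          have hval : (loopA T i w 1
              ((btA T (i + 1) (w - 1) dp).1 + costP T i (i + 2 * (w : Int) - 1))
              (btA T (i + 1) (w - 1) dp).2).1 = OPT T i w := by
            rw [OPT_else h1 h0, ← ra]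
            exact la
          refine ⟨hval, ?_⟩
          have hgood := goodA_insert lb i w
          rw [← hval] at hgood
          exact hgood

-- OPTl as a fold over the k-range (B's inner loop, pure form)
def stepB (T : List Int) (i : Int) (w : Nat) (mv : Int) (k : Nat) : Int :=
  min mv (OPT T i k + OPT T (i + 2 * (k : Int)) (w - k))

theorem OPTl_eq_foldl (T : List Int) (i : Int) (w : Nat) : ∀ (j k : Nat), w - k ≤ j → 1 ≤ k →
    ∀ (mv : Int), OPTl T i w k mv = (List.range' k (w - k)).foldl (stepB T i w) mv := by
  intro j
  induction j with
  | zero =>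
    intro k hk h1 mv
    have hno : ¬ (1 ≤ k ∧ k < w) := by omega
    have h0 : w - k = 0 := by omega
    rw [OPTl_neg hno, h0]
    rfl
  | succ j IHj =>
    intro k hk h1 mv
    by_cases h : 1 ≤ k ∧ k < w
    · rw [OPTl_pos h]
      have hr : w - k = (w - (k + 1)) + 1 := by omega
      conv_rhs => rw [hr, List.range'_succ]
      rw [List.foldl_cons]
      exact IHj (k + 1) (by omega) (by omega) _
    · have h0 : w - k = 0 := by omega
      rw [OPTl_neg h, h0]
      rfl

-- table invariant of B's fold: all cells (i', w') with w' ≤ bound present and correct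
def TblP (T : List Int) (n bound : Nat) (dp : PySem.Dict (Int × Int) Int) : Prop :=
  ∀ (w' i : Nat), 1 ≤ w' → w' ≤ bound → i + 2 * w' ≤ 2 * n →
    dp.get? ((i : Int), (w' : Int)) = some (OPT T (i : Int) w')

-- the body of B's inner loop
def innerB (T : List Int) (w : Nat) (dp : PySem.Dict (Int × Int) Int) (i : Nat) :
    PySem.Dict (Int × Int) Int :=
  let best :=
    if w = 1 then
      |PySem.List.pyGetD T (i : Int) 0 - PySem.List.pyGetD T ((i : Int) + 1) 0| + 1
    else
      let base := dp.getD ((i : Int) + 1, (w : Int) - 1) 0 +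
        |PySem.List.pyGetD T (i : Int) 0 - PySem.List.pyGetD T ((i : Int) + 2 * (w : Int) - 1) 0| + 1
      (List.range' 1 (w - 1)).foldl (fun best (k : Nat) =>
        let cur := dp.getD ((i : Int), (k : Int)) 0 +
          dp.getD ((i : Int) + 2 * (k : Int), (w : Int) - (k : Int)) 0
        if cur < best then cur else best) base
  dp.insert ((i : Int), (w : Int)) best

theorem wired_alt_eq (T : List Int) :
    wired_alt T = ((List.range' 1 (T.length / 2)).foldl (fun dp w =>
      (List.range (2 * (T.length / 2) - 2 * w + 1)).foldl (innerB T w) dp)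
        PySem.Dict.empty).getD (0, ((T.length / 2 : Nat) : Int)) 0 := by
  unfold wired_alt innerB
  rfl

theorem cell_correct (T : List Int) (n w i : Nat) (hw1 : 1 ≤ w)
    (hi : i + 2 * w ≤ 2 * n)
    (dp : PySem.Dict (Int × Int) Int) (hprev : TblP T n (w - 1) dp) :
    ((innerB T w dp i).get? ((i : Int), (w : Int))) = some (OPT T (i : Int) w) ∧
    (∀ (i' : Int) (w' : Nat), ((i' : Int), ((w' : Nat) : Int)) ≠ (((i : Nat) : Int), (w : Int)) →
      (innerB T w dp i).get? (i', (w' : Int)) = dp.get? (i', (w' : Int))) := by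
  have hbest :
      (if w = 1 then
        |PySem.List.pyGetD T (i : Int) 0 - PySem.List.pyGetD T ((i : Int) + 1) 0| + 1
      else
        (List.range' 1 (w - 1)).foldl (fun best (k : Nat) =>
          let cur := dp.getD ((i : Int), (k : Int)) 0 +
            dp.getD ((i : Int) + 2 * (k : Int), (w : Int) - (k : Int)) 0
          if cur < best then cur else best)
          (dp.getD ((i : Int) + 1, (w : Int) - 1) 0 +
            |PySem.List.pyGetD T (i : Int) 0 -
              PySem.List.pyGetD T ((i : Int) + 2 * (w : Int) - 1) 0| + 1)) =
      OPT T (i : Int) w := by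
    by_cases h1 : w = 1
    · rw [if_pos h1, OPT_one h1]
      rfl
    · rw [if_neg h1]
      have h0 : w ≠ 0 := by omega
      -- the base lookup is the cell (i+1, w-1)
      have hkey1 : (((i : Int) + 1), ((w : Int) - 1)) =
          ((((i + 1 : Nat)) : Int), (((w - 1 : Nat)) : Int)) := by
        have : ((w - 1 : Nat) : Int) = (w : Int) - 1 := by omega
        simp [this]
      have hb1 : dp.getD ((i : Int) + 1, (w : Int) - 1) 0 = OPT T ((i : Int) + 1) (w - 1) := by
        rw [hkey1]
        have hget := hprev (w - 1) (i + 1) (by omega) le_rfl (by omega)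
        rw [PySem.Dict.getD_eq_get?_getD, hget, Option.getD_some]
        have : (((i + 1 : Nat)) : Int) = (i : Int) + 1 := by push_cast; ring
        rw [this]
      rw [hb1]
      -- the inner fold is stepB on every member of the range
      have hfold : (List.range' 1 (w - 1)).foldl (fun best (k : Nat) =>
          let cur := dp.getD ((i : Int), (k : Int)) 0 +
            dp.getD ((i : Int) + 2 * (k : Int), (w : Int) - (k : Int)) 0
          if cur < best then cur else best)
          (OPT T ((i : Int) + 1) (w - 1) +
            |PySem.List.pyGetD T (i : Int) 0 -
              PySem.List.pyGetD T ((i : Int) + 2 * (w : Int) - 1) 0| + 1) =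
          (List.range' 1 (w - 1)).foldl (stepB T (i : Int) w)
          (OPT T ((i : Int) + 1) (w - 1) +
            |PySem.List.pyGetD T (i : Int) 0 -
              PySem.List.pyGetD T ((i : Int) + 2 * (w : Int) - 1) 0| + 1) := by
        apply List.foldl_ext
        intro b k hk
        rw [List.mem_range'_1] at hk
        have hcur1 : dp.getD ((i : Int), (k : Int)) 0 = OPT T (i : Int) k := by
          have hget := hprev k i hk.1 (by omega) (by omega)
          rw [PySem.Dict.getD_eq_get?_getD, hget, Option.getD_some]
        have hkey2 : (((i : Int) + 2 * (k : Int)), ((w : Int) - (k : Int))) =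
            ((((i + 2 * k : Nat)) : Int), (((w - k : Nat)) : Int)) := by
          have h2 : ((w - k : Nat) : Int) = (w : Int) - (k : Int) := by omega
          have h3 : ((i + 2 * k : Nat) : Int) = (i : Int) + 2 * (k : Int) := by push_cast; ring
          simp [h2, h3]
        have hcur2 : dp.getD ((i : Int) + 2 * (k : Int), (w : Int) - (k : Int)) 0 =
            OPT T ((i : Int) + 2 * (k : Int)) (w - k) := by
          rw [hkey2]
          have hget := hprev (w - k) (i + 2 * k) (by omega) (by omega) (by omega)
          rw [PySem.Dict.getD_eq_get?_getD, hget, Option.getD_some]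
          have : ((i + 2 * k : Nat) : Int) = (i : Int) + 2 * (k : Int) := by push_cast; ring
          rw [this]
        simp only [hcur1, hcur2, stepB]
        by_cases h : OPT T (i : Int) k + OPT T ((i : Int) + 2 * (k : Int)) (w - k) < b
        · rw [if_pos h, min_eq_right (le_of_lt h)]
        · rw [if_neg h, min_eq_left (by omega)]
      rw [hfold, ← OPTl_eq_foldl T (i : Int) w (w - 1) 1 (by omega) (by omega), OPT_else h1 h0]
      simp only [costP]
      exact congrArg (OPTl T (i : Int) w 1) (by ring)
  constructor
  · show (PySem.Dict.insert _ _ _).get? _ = _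
    rw [PySem.Dict.get?_insert, if_pos rfl]
    exact congrArg some hbest
  · intro i' w' hne
    show (PySem.Dict.insert _ _ _).get? _ = _
    rw [PySem.Dict.get?_insert, if_neg hne]

-- the inner loop over i fills row w and disturbs nothing below it
theorem innerFold_correct (T : List Int) (n w : Nat) (hw1 : 1 ≤ w) (hwn : w ≤ n) :
    ∀ (j : Nat), j ≤ 2 * n - 2 * w + 1 → ∀ (dp : PySem.Dict (Int × Int) Int),
      TblP T n (w - 1) dp →
      TblP T n (w - 1) ((List.range j).foldl (innerB T w) dp) ∧
      (∀ (i : Nat), i < j →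
        ((List.range j).foldl (innerB T w) dp).get? ((i : Int), (w : Int)) =
          some (OPT T (i : Int) w)) := by
  intro j
  induction j with
  | zero =>
    intro _ dp hdp
    exact ⟨hdp, fun i hi => absurd hi (by omega)⟩
  | succ j IHj =>
    intro hj dp hdp
    rw [List.range_succ, List.foldl_append, List.foldl_cons, List.foldl_nil]
    obtain ⟨hprev, hrow⟩ := IHj (by omega) dp hdp
    have hcell := cell_correct T n w j hw1 (by omega) _ hprev
    constructor
    · intro w' i h1 h2 h3
      rw [hcell.2 (i : Int) w' (by
        intro hcontra
        have : ((w' : Int)) = (w : Int) := congrArg Prod.snd hcontra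
        have : w' = w := by exact_mod_cast this
        omega)]
      exact hprev w' i h1 h2 h3
    · intro i hi
      by_cases hij : i = j
      · subst hij
        exact hcell.1
      · rw [hcell.2 (i : Int) w (by
          intro hcontra
          have : ((i : Int)) = (j : Int) := congrArg Prod.fst hcontra
          have : i = j := by exact_mod_cast this
          omega)]
        exact hrow i (by omega)

-- the outer loop over w builds the whole table
theorem outerFold_correct (T : List Int) (n : Nat) (hn : n = T.length / 2) :
    ∀ (m : Nat), m ≤ n →
      TblP T n m ((List.range' 1 m).foldl (fun dp (w : Nat) =>
        (List.range (2 * n - 2 * w + 1)).foldl (innerB T w) dp) PySem.Dict.empty) := by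
  intro m
  induction m with
  | zero =>
    intro _ w' i h1 h2 _
    omega
  | succ m IHm =>
    intro hm
    rw [List.range'_1_concat, List.foldl_append, List.foldl_cons, List.foldl_nil]
    have hprev : TblP T n ((1 + m) - 1) ((List.range' 1 m).foldl (fun dp (w : Nat) =>
        (List.range (2 * n - 2 * w + 1)).foldl (innerB T w) dp) PySem.Dict.empty) := by
      have : (1 + m) - 1 = m := by omega
      rw [this]
      exact IHm (by omega)
    obtain ⟨hkeep, hrow⟩ := innerFold_correct T n (1 + m) (by omega) (by omega)
      (2 * n - 2 * (1 + m) + 1) le_rfl _ hprev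
    intro w' i h1 h2 h3
    by_cases hw : w' = 1 + m
    · subst hw
      exact hrow i (by omega)
    · exact hkeep w' i h1 (by omega) h3

theorem goodA_empty (T : List Int) : GoodA T PySem.Dict.empty := by
  intro i w v hv
  rw [PySem.Dict.get?_empty] at hv
  exact absurd hv (by simp)

theorem wired_spec0 : ∀ (T : List Int), Pre_wired T → wired T = wired_alt T := by
  intro T hpre
  have hn1 : 1 ≤ T.length / 2 := by
    have := hpre
    unfold Pre_wired at this
    omega
  -- A's side: the memoized recursion computes the pure value
  have hA : wired T = OPT T 0 (T.length / 2) := by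
    unfold wired
    exact ((btA_loopA_correct T (T.length / 2)).1 0 PySem.Dict.empty (goodA_empty T)).1
  -- B's side: the table holds the pure value at (0, n)
  have htbl := outerFold_correct T (T.length / 2) rfl (T.length / 2) le_rfl
  have hget := htbl (T.length / 2) 0 hn1 le_rfl (by omega)
  rw [hA, wired_alt_eq]
  norm_cast at hget
  rw [PySem.Dict.getD_eq_get?_getD, hget, Option.getD_some]

-- ===== VERDICT (by name: the statement is the Claim_ definition above) =====
theorem wired_spec : Claim_equal_wired := by
  intro T _ hpre
  exact wired_spec0 T hpre
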